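-- pv_equiv track=rewrite | github.com/ZhengyangZhang06/ACG-simulation | src/backup/split_obj_frames.py | reindex_faces
-- ===== SOURCE A (Python) =====
-- from typing import Dict, List, Optional, Sequence, Tuple
--
-- Face = List[Tuple[int, Optional[int], Optional[int]]]
--
-- def reindex_faces(
--     faces: Sequence[Face],
--     vertices: Sequence[str],
--     texcoords: Sequence[str],
--     normals: Sequence[str],
-- ) -> Tuple[List[str], List[str], List[str], List[str]]:
--     vertex_map: Dict[int, int] = {}
--     texcoord_map: Dict[int, int] = {}
--     normal_map: Dict[int, int] = {}
--     vertex_lines: List[str] = []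
--     texcoord_lines: List[str] = []
--     normal_lines: List[str] = []
--     face_lines: List[str] = []
--
--     def map_index(old_idx: int, index_map: Dict[int, int]) -> int:
--         if old_idx in index_map:
--             return index_map[old_idx]
--         index_map[old_idx] = len(index_map) + 1
--         return index_map[old_idx]
--
--     for face in faces:
--         new_tokens: List[str] = []
--         for v_idx, vt_idx, vn_idx in face:
--             new_v = map_index(v_idx, vertex_map)
--             if new_v > len(vertex_lines):
--                 vertex_lines.append(vertices[v_idx - 1])
--
--             new_vt: Optional[int] = None
--             new_vn: Optional[int] = None
--             if vt_idx is not None: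
--                 new_vt = map_index(vt_idx, texcoord_map)
--                 if new_vt > len(texcoord_lines):
--                     texcoord_lines.append(texcoords[vt_idx - 1])
--             if vn_idx is not None:
--                 new_vn = map_index(vn_idx, normal_map)
--                 if new_vn > len(normal_lines):
--                     normal_lines.append(normals[vn_idx - 1])
--
--             if new_vt is None and new_vn is None:
--                 new_tokens.append(str(new_v))
--             elif new_vn is None:
--                 new_tokens.append(f"{new_v}/{new_vt}")
--             elif new_vt is None:
--                 new_tokens.append(f"{new_v}//{new_vn}")
--             else:
--                 new_tokens.append(f"{new_v}/{new_vt}/{new_vn}")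
--         face_lines.append("f " + " ".join(new_tokens))
--
--     return vertex_lines, texcoord_lines, normal_lines, face_lines
-- ===== SOURCE B (Python) =====
-- def reindex_faces(faces, vertices, texcoords, normals):
--     # Pass 1: first-appearance index maps only.
--     vmap, tmap, nmap = {}, {}, {}
--     for face in faces:
--         for v, vt, vn in face:
--             if v not in vmap:
--                 vmap[v] = len(vmap) + 1
--             if vt is not None and vt not in tmap:
--                 tmap[vt] = len(tmap) + 1
--             if vn is not None and vn not in nmap:
--                 nmap[vn] = len(nmap) + 1
--     # Pass 2: the kept lines, in first-appearance order = dict insertion order.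
--     vertex_lines = [vertices[k - 1] for k in vmap]
--     texcoord_lines = [texcoords[k - 1] for k in tmap]
--     normal_lines = [normals[k - 1] for k in nmap]
--     # Pass 3: face lines from the completed maps.
--     face_lines = []
--     for face in faces:
--         toks = []
--         for v, vt, vn in face:
--             if vt is None and vn is None:
--                 toks.append(str(vmap[v]))
--             elif vn is None:
--                 toks.append(f"{vmap[v]}/{tmap[vt]}")
--             elif vt is None:
--                 toks.append(f"{vmap[v]}//{nmap[vn]}")
--             else:
--                 toks.append(f"{vmap[v]}/{tmap[vt]}/{nmap[vn]}")
--         face_lines.append("f " + " ".join(toks))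
--     return vertex_lines, texcoord_lines, normal_lines, face_lines
-- ===== Notes on version B (the rewrite author's own statement) =====
-- stated objective: alternative
-- what changed: A interleaves map building, line collection and face formatting in one fused pass; B separates them into three phases: a first pass that only builds the three first-seen index maps, a comprehension that derives each line list from its map's keys, and a final pass that formats face lines from the completed maps.
import Mathlib
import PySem

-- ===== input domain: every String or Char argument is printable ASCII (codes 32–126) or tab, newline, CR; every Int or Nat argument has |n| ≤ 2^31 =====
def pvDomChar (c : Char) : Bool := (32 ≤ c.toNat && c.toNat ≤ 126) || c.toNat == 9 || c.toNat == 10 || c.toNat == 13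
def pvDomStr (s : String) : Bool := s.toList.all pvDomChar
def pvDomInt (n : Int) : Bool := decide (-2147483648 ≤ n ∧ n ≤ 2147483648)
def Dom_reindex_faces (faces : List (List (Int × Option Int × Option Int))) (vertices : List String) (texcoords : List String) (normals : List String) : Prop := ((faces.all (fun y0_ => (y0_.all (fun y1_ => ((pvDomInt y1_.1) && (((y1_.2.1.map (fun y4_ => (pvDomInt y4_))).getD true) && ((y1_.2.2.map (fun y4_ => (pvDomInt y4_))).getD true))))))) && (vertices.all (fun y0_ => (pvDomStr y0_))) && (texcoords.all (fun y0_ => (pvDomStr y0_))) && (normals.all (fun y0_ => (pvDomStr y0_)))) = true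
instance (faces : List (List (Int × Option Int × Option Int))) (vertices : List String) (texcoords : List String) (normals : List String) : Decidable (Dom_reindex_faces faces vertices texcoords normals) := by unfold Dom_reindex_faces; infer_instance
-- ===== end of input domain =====

-- B separates A's fused loop into three phases (maps, then line lists from keys, then face lines);
-- equal return value proved on all in-range inputs (objective: alternative decomposition, no speed claim).

-- ===== PORT A =====
-- map_index: mutates the dict, so the port returns the (value, dict) pair
def pyMapIndex (k : Int) (m : PySem.Dict Int Int) : Int × PySem.Dict Int Int :=
  if m.contains k then (m.getD k 0, m)
  else
    let m' := m.insert k ((m.size : Int) + 1)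
    (m'.getD k 0, m')

-- the inner 'for v_idx, vt_idx, vn_idx in face' loop of A; state = maps, line lists, new_tokens
def goCornersA (vertices texcoords normals : List String) :
    List (Int × Option Int × Option Int) →
    PySem.Dict Int Int → PySem.Dict Int Int → PySem.Dict Int Int →
    List String → List String → List String → List String →
    PySem.Dict Int Int × PySem.Dict Int Int × PySem.Dict Int Int × List String × List String × List String × List String
  | [], vm, tm, nm, vl, tl, nl, toks => (vm, tm, nm, vl, tl, nl, toks)
  | (v, vt, vn) :: rest, vm, tm, nm, vl, tl, nl, toks =>
    let p := pyMapIndex v vm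
    let newV := p.1
    let vm' := p.2
    let vl' := if newV > (vl.length : Int) then vl ++ [PySem.List.pyGetD vertices (v - 1) ""] else vl
    let q : Option Int × PySem.Dict Int Int × List String :=
      match vt with
      | none => (none, tm, tl)
      | some t =>
        let pt := pyMapIndex t tm
        (some pt.1, pt.2, if pt.1 > (tl.length : Int) then tl ++ [PySem.List.pyGetD texcoords (t - 1) ""] else tl)
    let r : Option Int × PySem.Dict Int Int × List String :=
      match vn with
      | none => (none, nm, nl)
      | some n =>
        let pn := pyMapIndex n nm
        (some pn.1, pn.2, if pn.1 > (nl.length : Int) then nl ++ [PySem.List.pyGetD normals (n - 1) ""] else nl)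
    let tok : String :=
      match q.1, r.1 with
      | none, none => PySem.Int.toStr newV
      | some nt, none => PySem.Int.toStr newV ++ "/" ++ PySem.Int.toStr nt
      | none, some nn => PySem.Int.toStr newV ++ "//" ++ PySem.Int.toStr nn
      | some nt, some nn => PySem.Int.toStr newV ++ "/" ++ PySem.Int.toStr nt ++ "/" ++ PySem.Int.toStr nn
    goCornersA vertices texcoords normals rest vm' q.2.1 r.2.1 vl' q.2.2 r.2.2 (toks ++ [tok])

-- the outer 'for face in faces' loop of A
def goFacesA (vertices texcoords normals : List String) :
    List (List (Int × Option Int × Option Int)) →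
    PySem.Dict Int Int → PySem.Dict Int Int → PySem.Dict Int Int →
    List String → List String → List String → List String →
    List String × List String × List String × List String
  | [], _, _, _, vl, tl, nl, fl => (vl, tl, nl, fl)
  | face :: rest, vm, tm, nm, vl, tl, nl, fl =>
    let s := goCornersA vertices texcoords normals face vm tm nm vl tl nl []
    goFacesA vertices texcoords normals rest s.1 s.2.1 s.2.2.1 s.2.2.2.1 s.2.2.2.2.1 s.2.2.2.2.2.1
      (fl ++ ["f " ++ PySem.Str.join " " s.2.2.2.2.2.2])

def reindex_faces (faces : List (List (Int × Option Int × Option Int))) (vertices : List String) (texcoords : List String) (normals : List String) : List String × List String × List String × List String :=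
  goFacesA vertices texcoords normals faces PySem.Dict.empty PySem.Dict.empty PySem.Dict.empty [] [] [] []

-- ===== PORT B =====
-- 'if k not in m: m[k] = len(m) + 1'
def bAddKey (m : PySem.Dict Int Int) (k : Int) : PySem.Dict Int Int :=
  if m.contains k then m else m.insert k ((m.size : Int) + 1)

def bPassCorner (s : PySem.Dict Int Int × PySem.Dict Int Int × PySem.Dict Int Int)
    (c : Int × Option Int × Option Int) :
    PySem.Dict Int Int × PySem.Dict Int Int × PySem.Dict Int Int :=
  (bAddKey s.1 c.1, c.2.1.elim s.2.1 (fun t => bAddKey s.2.1 t), c.2.2.elim s.2.2 (fun n => bAddKey s.2.2 n))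

def bPassCorners (cs : List (Int × Option Int × Option Int))
    (s : PySem.Dict Int Int × PySem.Dict Int Int × PySem.Dict Int Int) :
    PySem.Dict Int Int × PySem.Dict Int Int × PySem.Dict Int Int :=
  cs.foldl bPassCorner s

def bPassFaces (fs : List (List (Int × Option Int × Option Int)))
    (s : PySem.Dict Int Int × PySem.Dict Int Int × PySem.Dict Int Int) :
    PySem.Dict Int Int × PySem.Dict Int Int × PySem.Dict Int Int :=
  fs.foldl (fun s face => bPassCorners face s) s

-- '[src[k-1] for k in m]'
def bLines (m : PySem.Dict Int Int) (src : List String) : List String :=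
  m.keys.map (fun k => PySem.List.pyGetD src (k - 1) "")

def bToken (vm tm nm : PySem.Dict Int Int) (c : Int × Option Int × Option Int) : String :=
  match c.2.1, c.2.2 with
  | none, none => PySem.Int.toStr (vm.getD c.1 0)
  | some t, none => PySem.Int.toStr (vm.getD c.1 0) ++ "/" ++ PySem.Int.toStr (tm.getD t 0)
  | none, some n => PySem.Int.toStr (vm.getD c.1 0) ++ "//" ++ PySem.Int.toStr (nm.getD n 0)
  | some t, some n => PySem.Int.toStr (vm.getD c.1 0) ++ "/" ++ PySem.Int.toStr (tm.getD t 0) ++ "/" ++ PySem.Int.toStr (nm.getD n 0)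

def bFaceLine (vm tm nm : PySem.Dict Int Int) (face : List (Int × Option Int × Option Int)) : String :=
  "f " ++ PySem.Str.join " " (face.map (bToken vm tm nm))

def reindex_faces_alt (faces : List (List (Int × Option Int × Option Int))) (vertices : List String) (texcoords : List String) (normals : List String) : List String × List String × List String × List String :=
  let s := bPassFaces faces (PySem.Dict.empty, PySem.Dict.empty, PySem.Dict.empty)
  (bLines s.1 vertices, bLines s.2.1 texcoords, bLines s.2.2 normals,
    faces.map (bFaceLine s.1 s.2.1 s.2.2))

-- ===== PRECONDITION & SPEC =====
-- Pre_ excludes exactly the inputs on which Python A raises IndexError: a referenced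
-- 1-based index whose 0-based form v-1 falls outside Python's (negative-wrapping) range.
def Pre_reindex_faces (faces : List (List (Int × Option Int × Option Int))) (vertices : List String) (texcoords : List String) (normals : List String) : Prop :=
  (faces.all (fun face => face.all (fun c =>
    decide (PySem.Raise.InRange vertices.length (c.1 - 1)) &&
    ((c.2.1.map (fun t => decide (PySem.Raise.InRange texcoords.length (t - 1)))).getD true) &&
    ((c.2.2.map (fun n => decide (PySem.Raise.InRange normals.length (n - 1)))).getD true)))) = true
instance (faces : List (List (Int × Option Int × Option Int))) (vertices : List String) (texcoords : List String) (normals : List String) : Decidable (Pre_reindex_faces faces vertices texcoords normals) := by unfold Pre_reindex_faces; infer_instance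

def pvWitness_reindex_faces : (List (List (Int × Option Int × Option Int))) × List String × List String × List String :=
  ([[(1, some 1, none), (2, none, some 1)], [(2, some 1, some 1)]],
   ["v 0 0 0", "v 1 0 0"], ["vt 0 0"], ["vn 0 0 1"])

def Spec_reindex_faces (faces : List (List (Int × Option Int × Option Int))) (vertices : List String) (texcoords : List String) (normals : List String) (out : List String × List String × List String × List String) : Prop := out = reindex_faces_alt faces vertices texcoords normals
instance (faces : List (List (Int × Option Int × Option Int))) (vertices : List String) (texcoords : List String) (normals : List String) (out : List String × List String × List String × List String) : Decidable (Spec_reindex_faces faces vertices texcoords normals out) := by unfold Spec_reindex_faces; infer_instance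

-- ===== CLAIM (what is proved, stated in full; the proofs are below) =====
def Claim_equal_reindex_faces : Prop := ∀ (faces : List (List (Int × Option Int × Option Int))) (vertices : List String) (texcoords : List String) (normals : List String), Dom_reindex_faces faces vertices texcoords normals → Pre_reindex_faces faces vertices texcoords normals → Spec_reindex_faces faces vertices texcoords normals (reindex_faces faces vertices texcoords normals)

-- ===== LEMMAS AND PROOFS =====

-- 'm' extends into 'm'': every binding of m survives (maps only ever gain fresh keys)
def DExt (m m' : PySem.Dict Int Int) : Prop := ∀ k v, m.get? k = some v → m'.get? k = some v

theorem DExt_refl (m : PySem.Dict Int Int) : DExt m m := fun _ _ h => h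

theorem DExt_trans {a b c : PySem.Dict Int Int} (h1 : DExt a b) (h2 : DExt b c) : DExt a c :=
  fun k v h => h2 k v (h1 k v h)

theorem DExt_bAddKey (m : PySem.Dict Int Int) (x : Int) : DExt m (bAddKey m x) := by
  intro k v h
  unfold bAddKey
  split
  · exact h
  · next hc =>
    rw [PySem.Dict.get?_insert]
    split
    · next he =>
      subst he
      rw [PySem.Dict.contains_eq_isSome_get?, h] at hc
      simp at hc
    · exact h

theorem DExt_bPassCorner (s : PySem.Dict Int Int × PySem.Dict Int Int × PySem.Dict Int Int)
    (c : Int × Option Int × Option Int) :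
    DExt s.1 (bPassCorner s c).1 ∧ DExt s.2.1 (bPassCorner s c).2.1 ∧ DExt s.2.2 (bPassCorner s c).2.2 := by
  refine ⟨DExt_bAddKey _ _, ?_, ?_⟩ <;> unfold bPassCorner
  · cases c.2.1 with
    | none => exact DExt_refl _
    | some t => exact DExt_bAddKey _ _
  · cases c.2.2 with
    | none => exact DExt_refl _
    | some n => exact DExt_bAddKey _ _

theorem DExt_bPassCorners (cs : List (Int × Option Int × Option Int)) :
    ∀ s, DExt s.1 (bPassCorners cs s).1 ∧ DExt s.2.1 (bPassCorners cs s).2.1 ∧ DExt s.2.2 (bPassCorners cs s).2.2 := by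
  induction cs with
  | nil => exact fun s => ⟨DExt_refl _, DExt_refl _, DExt_refl _⟩
  | cons c rest ih =>
    intro s
    have h1 := DExt_bPassCorner s c
    have h2 := ih (bPassCorner s c)
    exact ⟨DExt_trans h1.1 h2.1, DExt_trans h1.2.1 h2.2.1, DExt_trans h1.2.2 h2.2.2⟩

theorem DExt_bPassFaces (fs : List (List (Int × Option Int × Option Int))) :
    ∀ s, DExt s.1 (bPassFaces fs s).1 ∧ DExt s.2.1 (bPassFaces fs s).2.1 ∧ DExt s.2.2 (bPassFaces fs s).2.2 := by
  induction fs with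
  | nil => exact fun s => ⟨DExt_refl _, DExt_refl _, DExt_refl _⟩
  | cons f rest ih =>
    intro s
    have h1 := DExt_bPassCorners f s
    have h2 := ih (bPassCorners f s)
    exact ⟨DExt_trans h1.1 h2.1, DExt_trans h1.2.1 h2.2.1, DExt_trans h1.2.2 h2.2.2⟩

-- A-state invariant: keys unique, values bounded by the size
def GoodD (m : PySem.Dict Int Int) : Prop :=
  m.keys.Nodup ∧ ∀ k v, m.get? k = some v → v ≤ (m.size : Int)

theorem GoodD_empty : GoodD (PySem.Dict.empty : PySem.Dict Int Int) := by
  constructor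
  · exact PySem.Dict.nodup_keys_empty
  · intro k v h
    rw [PySem.Dict.get?_empty] at h
    exact absurd h (by simp)

theorem GoodD_bAddKey (m : PySem.Dict Int Int) (k : Int) (h : GoodD m) : GoodD (bAddKey m k) := by
  unfold bAddKey
  split
  · exact h
  · next hc =>
    rw [Bool.not_eq_true] at hc
    refine ⟨PySem.Dict.nodup_keys_insert m k _ h.1, ?_⟩
    intro k' v hv
    rw [PySem.Dict.get?_insert] at hv
    rw [PySem.Dict.size_insert, if_neg (by simp [hc])]
    split at hv
    · cases hv
      push_cast
      omega
    · have := h.2 k' v hv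
      push_cast
      omega

theorem bAddKey_get?_self (m : PySem.Dict Int Int) (k : Int) :
    (bAddKey m k).get? k = some ((bAddKey m k).getD k 0) := by
  unfold bAddKey
  split
  · next hc =>
    rw [PySem.Dict.contains_eq_isSome_get?] at hc
    cases hv : m.get? k with
    | none => rw [hv] at hc; simp at hc
    | some v => rw [PySem.Dict.getD_eq_get?_getD, hv]; rfl
  · rw [PySem.Dict.get?_insert_self, PySem.Dict.getD_insert_self]

theorem pyMapIndex_eq (k : Int) (m : PySem.Dict Int Int) :
    pyMapIndex k m = ((bAddKey m k).getD k 0, bAddKey m k) := by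
  unfold pyMapIndex bAddKey
  split <;> rfl

-- the appended-line analysis: the 'if new > len(lines)' update keeps lines = bLines map src
theorem lines_step (m : PySem.Dict Int Int) (k : Int) (src : List String) (h : GoodD m) :
    (if (bAddKey m k).getD k 0 > ((bLines m src).length : Int)
      then bLines m src ++ [PySem.List.pyGetD src (k - 1) ""]
      else bLines m src) = bLines (bAddKey m k) src := by
  have hlen : ((bLines m src).length : Int) = (m.size : Int) := by
    simp [bLines, PySem.Dict.keys, PySem.Dict.size]
  rw [hlen]
  by_cases hc : m.contains k = true
  · have hm : bAddKey m k = m := by unfold bAddKey; rw [if_pos hc]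
    rw [hm]
    rw [PySem.Dict.contains_eq_isSome_get?] at hc
    cases hv : m.get? k with
    | none => rw [hv] at hc; simp at hc
    | some v =>
      have hle := h.2 k v hv
      rw [PySem.Dict.getD_eq_get?_getD, hv]
      simp only [Option.getD_some]
      rw [if_neg (by omega)]
  · rw [Bool.not_eq_true] at hc
    have hm : bAddKey m k = m.insert k ((m.size : Int) + 1) := by unfold bAddKey; rw [if_neg (by simp [hc])]
    rw [hm, PySem.Dict.getD_insert_self]
    rw [if_pos (by omega)]
    unfold bLines
    rw [PySem.Dict.keys_insert_of_not_contains m _ hc, List.map_append]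
    rfl

-- the fresh value is what any extension of the updated map reports
theorem token_val (m M : PySem.Dict Int Int) (k : Int)
    (hext : DExt (bAddKey m k) M) : M.getD k 0 = (bAddKey m k).getD k 0 := by
  have h := bAddKey_get?_self m k
  have h2 := hext _ _ h
  rw [PySem.Dict.getD_eq_get?_getD, h2]
  rfl

theorem GoodD_bPassCorners (cs : List (Int × Option Int × Option Int)) :
    ∀ s, GoodD s.1 → GoodD s.2.1 → GoodD s.2.2 →
      GoodD (bPassCorners cs s).1 ∧ GoodD (bPassCorners cs s).2.1 ∧ GoodD (bPassCorners cs s).2.2 := by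
  induction cs with
  | nil => exact fun s h1 h2 h3 => ⟨h1, h2, h3⟩
  | cons c rest ih =>
    intro s h1 h2 h3
    refine ih (bPassCorner s c) (GoodD_bAddKey _ _ h1) ?_ ?_
    · unfold bPassCorner
      cases c.2.1 with
      | none => exact h2
      | some t => exact GoodD_bAddKey _ _ h2
    · unfold bPassCorner
      cases c.2.2 with
      | none => exact h3
      | some n => exact GoodD_bAddKey _ _ h3

-- ===== main induction: A's inner loop = B's map pass + token formatting =====
theorem cornersA_eq (vertices texcoords normals : List String) (Mv Mt Mn : PySem.Dict Int Int) :
    ∀ (cs : List (Int × Option Int × Option Int)) (vm tm nm : PySem.Dict Int Int) (toks : List String),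
    GoodD vm → GoodD tm → GoodD nm →
    DExt (bPassCorners cs (vm, tm, nm)).1 Mv →
    DExt (bPassCorners cs (vm, tm, nm)).2.1 Mt →
    DExt (bPassCorners cs (vm, tm, nm)).2.2 Mn →
    goCornersA vertices texcoords normals cs vm tm nm (bLines vm vertices) (bLines tm texcoords) (bLines nm normals) toks
      = ((bPassCorners cs (vm, tm, nm)).1, (bPassCorners cs (vm, tm, nm)).2.1, (bPassCorners cs (vm, tm, nm)).2.2,
         bLines (bPassCorners cs (vm, tm, nm)).1 vertices,
         bLines (bPassCorners cs (vm, tm, nm)).2.1 texcoords,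
         bLines (bPassCorners cs (vm, tm, nm)).2.2 normals,
         toks ++ cs.map (bToken Mv Mt Mn)) := by
  intro cs
  induction cs with
  | nil =>
    intro vm tm nm toks _ _ _ _ _ _
    simp [goCornersA, bPassCorners]
  | cons c rest ih =>
    intro vm tm nm toks hgv hgt hgn hMv hMt hMn
    obtain ⟨v, vt, vn⟩ := c
    have hstep : ∀ s, bPassCorners ((v, vt, vn) :: rest) s = bPassCorners rest (bPassCorner s (v, vt, vn)) :=
      fun s => rfl
    rw [hstep] at hMv hMt hMn ⊢
    have hev : DExt (bAddKey vm v) Mv :=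
      DExt_trans (DExt_bPassCorners rest (bPassCorner (vm, tm, nm) (v, vt, vn))).1 hMv
    cases vt with
    | none =>
      cases vn with
      | none =>
        simp only [goCornersA, pyMapIndex_eq]
        rw [lines_step vm v vertices hgv]
        rw [ih (bAddKey vm v) tm nm _ (GoodD_bAddKey _ _ hgv) hgt hgn hMv hMt hMn]
        simp [bPassCorner, bToken, token_val vm Mv v hev]
      | some n =>
        have hen : DExt (bAddKey nm n) Mn :=
          DExt_trans (DExt_bPassCorners rest (bPassCorner (vm, tm, nm) (v, none, some n))).2.2 hMn
        simp only [goCornersA, pyMapIndex_eq]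
        rw [lines_step vm v vertices hgv, lines_step nm n normals hgn]
        rw [ih (bAddKey vm v) tm (bAddKey nm n) _ (GoodD_bAddKey _ _ hgv) hgt (GoodD_bAddKey _ _ hgn) hMv hMt hMn]
        simp [bPassCorner, bToken, token_val vm Mv v hev, token_val nm Mn n hen]
    | some t =>
      have het : DExt (bAddKey tm t) Mt :=
        DExt_trans (DExt_bPassCorners rest (bPassCorner (vm, tm, nm) (v, some t, vn))).2.1 hMt
      cases vn with
      | none =>
        simp only [goCornersA, pyMapIndex_eq]
        rw [lines_step vm v vertices hgv, lines_step tm t texcoords hgt]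
        rw [ih (bAddKey vm v) (bAddKey tm t) nm _ (GoodD_bAddKey _ _ hgv) (GoodD_bAddKey _ _ hgt) hgn hMv hMt hMn]
        simp [bPassCorner, bToken, token_val vm Mv v hev, token_val tm Mt t het]
      | some n =>
        have hen : DExt (bAddKey nm n) Mn :=
          DExt_trans (DExt_bPassCorners rest (bPassCorner (vm, tm, nm) (v, some t, some n))).2.2 hMn
        simp only [goCornersA, pyMapIndex_eq]
        rw [lines_step vm v vertices hgv, lines_step tm t texcoords hgt, lines_step nm n normals hgn]
        rw [ih (bAddKey vm v) (bAddKey tm t) (bAddKey nm n) _ (GoodD_bAddKey _ _ hgv) (GoodD_bAddKey _ _ hgt) (GoodD_bAddKey _ _ hgn) hMv hMt hMn]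
        simp [bPassCorner, bToken, token_val vm Mv v hev, token_val tm Mt t het, token_val nm Mn n hen]

theorem facesA_eq (vertices texcoords normals : List String) (Mv Mt Mn : PySem.Dict Int Int) :
    ∀ (fs : List (List (Int × Option Int × Option Int))) (vm tm nm : PySem.Dict Int Int) (fl : List String),
    GoodD vm → GoodD tm → GoodD nm →
    DExt (bPassFaces fs (vm, tm, nm)).1 Mv →
    DExt (bPassFaces fs (vm, tm, nm)).2.1 Mt →
    DExt (bPassFaces fs (vm, tm, nm)).2.2 Mn →
    goFacesA vertices texcoords normals fs vm tm nm (bLines vm vertices) (bLines tm texcoords) (bLines nm normals) fl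
      = (bLines (bPassFaces fs (vm, tm, nm)).1 vertices,
         bLines (bPassFaces fs (vm, tm, nm)).2.1 texcoords,
         bLines (bPassFaces fs (vm, tm, nm)).2.2 normals,
         fl ++ fs.map (bFaceLine Mv Mt Mn)) := by
  intro fs
  induction fs with
  | nil =>
    intro vm tm nm fl _ _ _ _ _ _
    simp [goFacesA, bPassFaces]
  | cons face rest ih =>
    intro vm tm nm fl hgv hgt hgn hMv hMt hMn
    have hstep : ∀ s, bPassFaces (face :: rest) s = bPassFaces rest (bPassCorners face s) :=
      fun s => rfl
    rw [hstep] at hMv hMt hMn ⊢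
    have hgood := GoodD_bPassCorners face (vm, tm, nm) hgv hgt hgn
    have hec := DExt_bPassFaces rest (bPassCorners face (vm, tm, nm))
    simp only [goFacesA]
    rw [cornersA_eq vertices texcoords normals Mv Mt Mn face vm tm nm [] hgv hgt hgn
      (DExt_trans hec.1 hMv) (DExt_trans hec.2.1 hMt) (DExt_trans hec.2.2 hMn)]
    rw [ih (bPassCorners face (vm, tm, nm)).1 (bPassCorners face (vm, tm, nm)).2.1
      (bPassCorners face (vm, tm, nm)).2.2 _ hgood.1 hgood.2.1 hgood.2.2 hMv hMt hMn]
    simp [bFaceLine]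

-- ===== VERDICT (by name: the statement is the Claim_ definition above) =====
theorem reindex_faces_spec : Claim_equal_reindex_faces := by
  intro faces vertices texcoords normals _ _
  unfold Spec_reindex_faces reindex_faces reindex_faces_alt
  have hempty : bLines PySem.Dict.empty ([] : List String) = [] := rfl
  have h := facesA_eq vertices texcoords normals
    (bPassFaces faces (PySem.Dict.empty, PySem.Dict.empty, PySem.Dict.empty)).1
    (bPassFaces faces (PySem.Dict.empty, PySem.Dict.empty, PySem.Dict.empty)).2.1
    (bPassFaces faces (PySem.Dict.empty, PySem.Dict.empty, PySem.Dict.empty)).2.2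
    faces PySem.Dict.empty PySem.Dict.empty PySem.Dict.empty []
    GoodD_empty GoodD_empty GoodD_empty (DExt_refl _) (DExt_refl _) (DExt_refl _)
  simpa [bLines, PySem.Dict.keys_empty] using h
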